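-- pv_equiv track=rewrite | github.com/taufanadharsyah/arkana17 | izi_dashboard/models/common/izi_dashboard_lab.py | _sort_date_field_ids
-- ===== SOURCE A (Python) =====
-- def _sort_date_field_ids(date_field_ids, date_format_by_field_id):
--     result = []
--     day_fields = []
--     week_fields = []
--     month_fields = []
--     quarter_fields = []
--     year_fields = []
--     other_fields = []
--     for df in date_field_ids:
--         date_format = date_format_by_field_id[df]
--         if date_format == 'day':
--             day_fields.append(df)
--         elif date_format == 'week':
--             week_fields.append(df)
--         elif date_format == 'month':
--             month_fields.append(df)
--         elif date_format == 'quarter':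
--             quarter_fields.append(df)
--         elif date_format == 'year':
--             year_fields.append(df)
--         else:
--             other_fields.append(df)
--     result = day_fields + week_fields + month_fields + quarter_fields + year_fields + other_fields
--     return result
-- ===== SOURCE B (Python) =====
-- def _sort_date_field_ids(date_field_ids, date_format_by_field_id):
--     rank = {'day': 0, 'week': 1, 'month': 2, 'quarter': 3, 'year': 4}
--     return sorted(date_field_ids,
--                   key=lambda df: rank.get(date_format_by_field_id[df], 5))
-- ===== Notes on version B (the rewrite author's own statement) =====
-- stated objective: idiomatic
-- what changed: Replaces the six explicit bucket lists and concatenation with a single stable sort keyed by a granularity rank dict (unknown formats rank 5, so they keep last place; stability preserves original order within each granularity).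
import Mathlib
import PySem

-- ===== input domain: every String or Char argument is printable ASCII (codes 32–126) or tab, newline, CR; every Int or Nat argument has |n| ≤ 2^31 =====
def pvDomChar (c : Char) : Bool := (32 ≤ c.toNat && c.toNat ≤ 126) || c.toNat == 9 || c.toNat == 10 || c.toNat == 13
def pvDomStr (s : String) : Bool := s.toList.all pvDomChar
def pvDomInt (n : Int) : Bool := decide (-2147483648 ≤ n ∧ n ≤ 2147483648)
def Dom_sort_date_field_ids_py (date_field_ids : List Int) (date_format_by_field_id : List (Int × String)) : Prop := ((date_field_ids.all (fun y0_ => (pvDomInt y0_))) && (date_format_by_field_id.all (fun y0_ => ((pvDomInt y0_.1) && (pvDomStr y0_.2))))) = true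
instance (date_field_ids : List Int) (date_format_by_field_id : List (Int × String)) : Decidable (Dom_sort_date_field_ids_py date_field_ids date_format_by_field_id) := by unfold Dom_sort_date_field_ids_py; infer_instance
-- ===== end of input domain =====

-- B replaces A's six explicit bucket lists with one stable sort by a granularity rank (idiomatic; same return value).

-- ===== PORT A =====
-- the body of A's for-loop: one step over the six accumulator lists (day, week, month, quarter, year, other)
def pvStepA (date_format_by_field_id : List (Int × String))
    (s : List Int × List Int × List Int × List Int × List Int × List Int) (df : Int) :
    List Int × List Int × List Int × List Int × List Int × List Int :=
  -- dict subscript: on a missing key Python raises KeyError (excluded by Pre_); getD's default is never reached inside Pre_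
  let fmt := (PySem.Dict.mk date_format_by_field_id).getD df ""
  if fmt = "day" then (s.1 ++ [df], s.2.1, s.2.2.1, s.2.2.2.1, s.2.2.2.2.1, s.2.2.2.2.2)
  else if fmt = "week" then (s.1, s.2.1 ++ [df], s.2.2.1, s.2.2.2.1, s.2.2.2.2.1, s.2.2.2.2.2)
  else if fmt = "month" then (s.1, s.2.1, s.2.2.1 ++ [df], s.2.2.2.1, s.2.2.2.2.1, s.2.2.2.2.2)
  else if fmt = "quarter" then (s.1, s.2.1, s.2.2.1, s.2.2.2.1 ++ [df], s.2.2.2.2.1, s.2.2.2.2.2)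
  else if fmt = "year" then (s.1, s.2.1, s.2.2.1, s.2.2.2.1, s.2.2.2.2.1 ++ [df], s.2.2.2.2.2)
  else (s.1, s.2.1, s.2.2.1, s.2.2.2.1, s.2.2.2.2.1, s.2.2.2.2.2 ++ [df])

def sort_date_field_ids_py (date_field_ids : List Int) (date_format_by_field_id : List (Int × String)) : List Int :=
  let st := date_field_ids.foldl (pvStepA date_format_by_field_id) ([], [], [], [], [], [])
  st.1 ++ st.2.1 ++ st.2.2.1 ++ st.2.2.2.1 ++ st.2.2.2.2.1 ++ st.2.2.2.2.2

-- ===== PORT B =====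
-- rank.get(fmt, 5) for the literal dict {'day':0,'week':1,'month':2,'quarter':3,'year':4}
def pvRank (fmt : String) : Int :=
  if fmt = "day" then 0
  else if fmt = "week" then 1
  else if fmt = "month" then 2
  else if fmt = "quarter" then 3
  else if fmt = "year" then 4
  else 5

-- the sort key: rank.get(date_format_by_field_id[df], 5); the dict subscript raises KeyError outside Pre_
def pvKey (date_format_by_field_id : List (Int × String)) (df : Int) : Int :=
  pvRank ((PySem.Dict.mk date_format_by_field_id).getD df "")

def sort_date_field_ids_py_alt (date_field_ids : List Int) (date_format_by_field_id : List (Int × String)) : List Int :=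
  PySem.List.sorted date_field_ids (pvKey date_format_by_field_id) false

-- ===== PRECONDITION & SPEC =====
-- Pre_ excludes exactly the inputs where some id is missing from the dict: there both Pythons raise KeyError.
def Pre_sort_date_field_ids_py (date_field_ids : List Int) (date_format_by_field_id : List (Int × String)) : Prop :=
  ∀ df ∈ date_field_ids, ((PySem.Dict.mk date_format_by_field_id).get? df).isSome = true
instance (date_field_ids : List Int) (date_format_by_field_id : List (Int × String)) : Decidable (Pre_sort_date_field_ids_py date_field_ids date_format_by_field_id) := by unfold Pre_sort_date_field_ids_py; infer_instance
def pvWitness_sort_date_field_ids_py : List Int × (List (Int × String)) := ([3, 1, 2, 4], [(1, "day"), (2, "month"), (3, "year"), (4, "banana")])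

def Spec_sort_date_field_ids_py (date_field_ids : List Int) (date_format_by_field_id : List (Int × String)) (out : List Int) : Prop := out = sort_date_field_ids_py_alt date_field_ids date_format_by_field_id
instance (date_field_ids : List Int) (date_format_by_field_id : List (Int × String)) (out : List Int) : Decidable (Spec_sort_date_field_ids_py date_field_ids date_format_by_field_id out) := by unfold Spec_sort_date_field_ids_py; infer_instance

-- ===== CLAIM (what is proved, stated in full; the proofs are below) =====
def Claim_equal_sort_date_field_ids_py : Prop := ∀ (date_field_ids : List Int) (date_format_by_field_id : List (Int × String)), Dom_sort_date_field_ids_py date_field_ids date_format_by_field_id → Pre_sort_date_field_ids_py date_field_ids date_format_by_field_id → Spec_sort_date_field_ids_py date_field_ids date_format_by_field_id (sort_date_field_ids_py date_field_ids date_format_by_field_id)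

-- ===== LEMMAS AND PROOFS =====

-- the elements of granularity j, in original order
def pvFk (d : List (Int × String)) (j : Int) (xs : List Int) : List Int :=
  xs.filter (fun a => decide (pvKey d a = j))

lemma pvBucket_key {d : List (Int × String)} {j y : Int} {xs : List Int}
    (hy : y ∈ pvFk d j xs) : pvKey d y = j := by
  have := List.of_mem_filter hy
  simpa using this

-- A's loop appends each id to the bucket of its granularity, so the final state is the six filters
lemma pvFoldA (d : List (Int × String)) :
    ∀ (xs : List Int) (s1 s2 s3 s4 s5 s6 : List Int),
      xs.foldl (pvStepA d) (s1, s2, s3, s4, s5, s6) =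
        (s1 ++ pvFk d 0 xs, s2 ++ pvFk d 1 xs, s3 ++ pvFk d 2 xs,
         s4 ++ pvFk d 3 xs, s5 ++ pvFk d 4 xs, s6 ++ pvFk d 5 xs) := by
  intro xs
  induction xs with
  | nil => intro s1 s2 s3 s4 s5 s6; simp [pvFk]
  | cons df xs ih =>
    intro s1 s2 s3 s4 s5 s6
    rw [List.foldl_cons]
    by_cases h1 : (PySem.Dict.mk d).getD df "" = "day"
    · rw [show pvStepA d (s1, s2, s3, s4, s5, s6) df = (s1 ++ [df], s2, s3, s4, s5, s6) from by simp [pvStepA, h1], ih]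
      simp [pvFk, pvKey, pvRank, h1, List.append_assoc]
    by_cases h2 : (PySem.Dict.mk d).getD df "" = "week"
    · rw [show pvStepA d (s1, s2, s3, s4, s5, s6) df = (s1, s2 ++ [df], s3, s4, s5, s6) from by simp [pvStepA, h2], ih]
      simp [pvFk, pvKey, pvRank, h2, List.append_assoc]
    by_cases h3 : (PySem.Dict.mk d).getD df "" = "month"
    · rw [show pvStepA d (s1, s2, s3, s4, s5, s6) df = (s1, s2, s3 ++ [df], s4, s5, s6) from by simp [pvStepA, h3], ih]
      simp [pvFk, pvKey, pvRank, h3, List.append_assoc]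
    by_cases h4 : (PySem.Dict.mk d).getD df "" = "quarter"
    · rw [show pvStepA d (s1, s2, s3, s4, s5, s6) df = (s1, s2, s3, s4 ++ [df], s5, s6) from by simp [pvStepA, h4], ih]
      simp [pvFk, pvKey, pvRank, h4, List.append_assoc]
    by_cases h5 : (PySem.Dict.mk d).getD df "" = "year"
    · rw [show pvStepA d (s1, s2, s3, s4, s5, s6) df = (s1, s2, s3, s4, s5 ++ [df], s6) from by simp [pvStepA, h5], ih]
      simp [pvFk, pvKey, pvRank, h5, List.append_assoc]
    rw [show pvStepA d (s1, s2, s3, s4, s5, s6) df = (s1, s2, s3, s4, s5, s6 ++ [df]) from by simp [pvStepA, h1, h2, h3, h4, h5], ih]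
    simp [pvFk, pvKey, pvRank, h1, h2, h3, h4, h5, List.append_assoc]

lemma pvInsert_skip (before : Int → Int → Bool) (x : Int) :
    ∀ (L R : List Int), (∀ y ∈ L, before x y = false) →
      PySem.List.insertBy before x (L ++ R) = L ++ PySem.List.insertBy before x R := by
  intro L
  induction L with
  | nil => intro R _; rfl
  | cons y L ih =>
    intro R h
    have hy : before x y = false := h y (by simp)
    simp [PySem.List.insertBy, hy, ih R (fun z hz => h z (by simp [hz]))]

lemma pvInsert_front (before : Int → Int → Bool) (x : Int) (R : List Int)
    (h : ∀ y ∈ R, before x y = true) :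
    PySem.List.insertBy before x R = x :: R := by
  cases R with
  | nil => rfl
  | cons y ys => simp [PySem.List.insertBy, h y (by simp)]

lemma pvInsert_between (before : Int → Int → Bool) (x : Int) (L R : List Int)
    (hL : ∀ y ∈ L, before x y = false) (hR : ∀ y ∈ R, before x y = true) :
    PySem.List.insertBy before x (L ++ R) = L ++ x :: R := by
  rw [pvInsert_skip before x L R hL, pvInsert_front before x R hR]

lemma pvRank_cases (fmt : String) :
    pvRank fmt = 0 ∨ pvRank fmt = 1 ∨ pvRank fmt = 2 ∨ pvRank fmt = 3 ∨ pvRank fmt = 4 ∨ pvRank fmt = 5 := by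
  unfold pvRank; split_ifs <;> simp

-- the stable sort by rank lists the granularity buckets in rank order, each in original order
lemma pvSortedB (d : List (Int × String)) :
    ∀ (xs : List Int),
      PySem.List.sorted xs (pvKey d) false =
        pvFk d 0 xs ++ pvFk d 1 xs ++ pvFk d 2 xs ++ pvFk d 3 xs ++ pvFk d 4 xs ++ pvFk d 5 xs := by
  intro xs
  induction xs using List.reverseRecOn with
  | nil => simp [PySem.List.sorted, pvFk]
  | append_singleton xs x ih =>
    have hstep : PySem.List.sorted (xs ++ [x]) (pvKey d) false =
        PySem.List.insertBy (fun a b => decide (pvKey d a < pvKey d b)) x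
          (PySem.List.sorted xs (pvKey d) false) := by
      rw [PySem.List.sorted_eq_foldl_insertBy, PySem.List.sorted_eq_foldl_insertBy,
        List.foldl_append]
      rfl
    rw [hstep, ih]
    have hr := pvRank_cases ((PySem.Dict.mk d).getD x "")
    have hfil : ∀ j : Int, pvFk d j (xs ++ [x]) =
        pvFk d j xs ++ (if pvKey d x = j then [x] else []) := by
      intro j
      simp only [pvFk, List.filter_append, List.filter_cons, List.filter_nil]
      split_ifs with h <;> simp_all
    rcases hr with hr | hr | hr | hr | hr | hr
    · have hk : pvKey d x = 0 := hr
      have hL : ∀ y ∈ pvFk d 0 xs, (decide (pvKey d x < pvKey d y)) = false := by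
        intro y hy
        simp [hk, pvBucket_key hy]
      have hR : ∀ y ∈ pvFk d 1 xs ++ pvFk d 2 xs ++ pvFk d 3 xs ++ pvFk d 4 xs ++ pvFk d 5 xs, (decide (pvKey d x < pvKey d y)) = true := by
        intro y hy
        simp only [List.mem_append] at hy
        rcases hy with ((((hy|hy)|hy)|hy)|hy) <;> simp [hk, pvBucket_key hy]
      rw [show pvFk d 0 xs ++ pvFk d 1 xs ++ pvFk d 2 xs ++ pvFk d 3 xs ++ pvFk d 4 xs ++ pvFk d 5 xs = (pvFk d 0 xs) ++ (pvFk d 1 xs ++ pvFk d 2 xs ++ pvFk d 3 xs ++ pvFk d 4 xs ++ pvFk d 5 xs) from by simp [List.append_assoc]]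
      rw [pvInsert_between _ x _ _ hL hR]
      simp [hfil, hk, List.append_assoc]
    · have hk : pvKey d x = 1 := hr
      have hL : ∀ y ∈ pvFk d 0 xs ++ pvFk d 1 xs, (decide (pvKey d x < pvKey d y)) = false := by
        intro y hy
        simp only [List.mem_append] at hy
        rcases hy with (hy|hy) <;> simp [hk, pvBucket_key hy]
      have hR : ∀ y ∈ pvFk d 2 xs ++ pvFk d 3 xs ++ pvFk d 4 xs ++ pvFk d 5 xs, (decide (pvKey d x < pvKey d y)) = true := by
        intro y hy
        simp only [List.mem_append] at hy
        rcases hy with (((hy|hy)|hy)|hy) <;> simp [hk, pvBucket_key hy]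
      rw [show pvFk d 0 xs ++ pvFk d 1 xs ++ pvFk d 2 xs ++ pvFk d 3 xs ++ pvFk d 4 xs ++ pvFk d 5 xs = (pvFk d 0 xs ++ pvFk d 1 xs) ++ (pvFk d 2 xs ++ pvFk d 3 xs ++ pvFk d 4 xs ++ pvFk d 5 xs) from by simp [List.append_assoc]]
      rw [pvInsert_between _ x _ _ hL hR]
      simp [hfil, hk, List.append_assoc]
    · have hk : pvKey d x = 2 := hr
      have hL : ∀ y ∈ pvFk d 0 xs ++ pvFk d 1 xs ++ pvFk d 2 xs, (decide (pvKey d x < pvKey d y)) = false := by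
        intro y hy
        simp only [List.mem_append] at hy
        rcases hy with ((hy|hy)|hy) <;> simp [hk, pvBucket_key hy]
      have hR : ∀ y ∈ pvFk d 3 xs ++ pvFk d 4 xs ++ pvFk d 5 xs, (decide (pvKey d x < pvKey d y)) = true := by
        intro y hy
        simp only [List.mem_append] at hy
        rcases hy with ((hy|hy)|hy) <;> simp [hk, pvBucket_key hy]
      rw [show pvFk d 0 xs ++ pvFk d 1 xs ++ pvFk d 2 xs ++ pvFk d 3 xs ++ pvFk d 4 xs ++ pvFk d 5 xs = (pvFk d 0 xs ++ pvFk d 1 xs ++ pvFk d 2 xs) ++ (pvFk d 3 xs ++ pvFk d 4 xs ++ pvFk d 5 xs) from by simp [List.append_assoc]]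
      rw [pvInsert_between _ x _ _ hL hR]
      simp [hfil, hk, List.append_assoc]
    · have hk : pvKey d x = 3 := hr
      have hL : ∀ y ∈ pvFk d 0 xs ++ pvFk d 1 xs ++ pvFk d 2 xs ++ pvFk d 3 xs, (decide (pvKey d x < pvKey d y)) = false := by
        intro y hy
        simp only [List.mem_append] at hy
        rcases hy with (((hy|hy)|hy)|hy) <;> simp [hk, pvBucket_key hy]
      have hR : ∀ y ∈ pvFk d 4 xs ++ pvFk d 5 xs, (decide (pvKey d x < pvKey d y)) = true := by
        intro y hy
        simp only [List.mem_append] at hy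
        rcases hy with (hy|hy) <;> simp [hk, pvBucket_key hy]
      rw [show pvFk d 0 xs ++ pvFk d 1 xs ++ pvFk d 2 xs ++ pvFk d 3 xs ++ pvFk d 4 xs ++ pvFk d 5 xs = (pvFk d 0 xs ++ pvFk d 1 xs ++ pvFk d 2 xs ++ pvFk d 3 xs) ++ (pvFk d 4 xs ++ pvFk d 5 xs) from by simp [List.append_assoc]]
      rw [pvInsert_between _ x _ _ hL hR]
      simp [hfil, hk, List.append_assoc]
    · have hk : pvKey d x = 4 := hr
      have hL : ∀ y ∈ pvFk d 0 xs ++ pvFk d 1 xs ++ pvFk d 2 xs ++ pvFk d 3 xs ++ pvFk d 4 xs, (decide (pvKey d x < pvKey d y)) = false := by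
        intro y hy
        simp only [List.mem_append] at hy
        rcases hy with ((((hy|hy)|hy)|hy)|hy) <;> simp [hk, pvBucket_key hy]
      have hR : ∀ y ∈ pvFk d 5 xs, (decide (pvKey d x < pvKey d y)) = true := by
        intro y hy
        simp [hk, pvBucket_key hy]
      rw [show pvFk d 0 xs ++ pvFk d 1 xs ++ pvFk d 2 xs ++ pvFk d 3 xs ++ pvFk d 4 xs ++ pvFk d 5 xs = (pvFk d 0 xs ++ pvFk d 1 xs ++ pvFk d 2 xs ++ pvFk d 3 xs ++ pvFk d 4 xs) ++ (pvFk d 5 xs) from by simp [List.append_assoc]]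
      rw [pvInsert_between _ x _ _ hL hR]
      simp [hfil, hk, List.append_assoc]
    · have hk : pvKey d x = 5 := hr
      have hL : ∀ y ∈ pvFk d 0 xs ++ pvFk d 1 xs ++ pvFk d 2 xs ++ pvFk d 3 xs ++ pvFk d 4 xs ++ pvFk d 5 xs, (decide (pvKey d x < pvKey d y)) = false := by
        intro y hy
        simp only [List.mem_append] at hy
        rcases hy with (((((hy|hy)|hy)|hy)|hy)|hy) <;> simp [hk, pvBucket_key hy]
      have hR : ∀ y ∈ ([] : List Int), (decide (pvKey d x < pvKey d y)) = true := by
        intro y hy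
        exact absurd hy (List.not_mem_nil)
        
      rw [show pvFk d 0 xs ++ pvFk d 1 xs ++ pvFk d 2 xs ++ pvFk d 3 xs ++ pvFk d 4 xs ++ pvFk d 5 xs = (pvFk d 0 xs ++ pvFk d 1 xs ++ pvFk d 2 xs ++ pvFk d 3 xs ++ pvFk d 4 xs ++ pvFk d 5 xs) ++ (([] : List Int)) from by simp [List.append_assoc]]
      rw [pvInsert_between _ x _ _ hL hR]
      simp [hfil, hk, List.append_assoc]

-- ===== VERDICT (by name: the statement is the Claim_ definition above) =====
theorem sort_date_field_ids_py_spec : Claim_equal_sort_date_field_ids_py := by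
  intro ids d _ _
  unfold Spec_sort_date_field_ids_py sort_date_field_ids_py sort_date_field_ids_py_alt
  rw [pvFoldA, pvSortedB]
  simp
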